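-- pv_equiv track=rewrite | github.com/onyxolu/DSA | Stripe/MatchingPairs.py | disjoint_two_sum_pairs
-- ===== SOURCE A (Python) =====
-- from collections import defaultdict, deque
-- from typing import List, Tuple, Dict, Union
--
-- def disjoint_two_sum_pairs(nums: List[int], target: int) -> List[Tuple[int, int]]:
--     """
--     Build disjoint pairs, prefer earliest indices.
--     When a value arrives, if someone is waiting for it, pair with the earliest waiter.
--     Else, add this index to the wait list for its needed partner.
--     """
--     waiting: Dict[int, deque] = defaultdict(deque)  # value we need -> queue of indices waiting for it
--     pairs: List[Tuple[int, int]] = []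
--
--     for i, v in enumerate(nums):
--         if waiting[v]:
--             j = waiting[v].popleft()
--             pairs.append((j, i))
--         else:
--             need = target - v
--             waiting[need].append(i)
--
--     pairs.sort(key=lambda p: (p[0], p[1]))
--     return pairs
-- ===== SOURCE B (Python) =====
-- def disjoint_two_sum_pairs(nums, target):
--     # Bucket each value's indices once; then pair the k-th occurrence of v with
--     # the k-th occurrence of target - v (consecutive occurrences when 2*v == target),
--     # which reproduces A's online FIFO matching; finally sort like A does.
--     occ = {}
--     for i, v in enumerate(nums):
--         occ.setdefault(v, []).append(i)
--     pairs = []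
--     for v, idxs in occ.items():
--         w = target - v
--         if v == w:
--             it = iter(idxs)
--             pairs += zip(it, it)          # consecutive occurrences
--         elif v < w and w in occ:
--             pairs += [(a, b) if a < b else (b, a) for a, b in zip(idxs, occ[w])]
--     pairs.sort()
--     return pairs
-- ===== Notes on version B (the rewrite author's own statement) =====
-- stated objective: faster
-- what changed: Replaces A's online FIFO waiting-queue scan by a two-pass bucket decomposition: group each value's indices once, then pair the k-th occurrence of v with the k-th occurrence of target-v (consecutive occurrences when 2v=target), which provably reproduces A's online matching; both then sort the pairs.
import Mathlib
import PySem

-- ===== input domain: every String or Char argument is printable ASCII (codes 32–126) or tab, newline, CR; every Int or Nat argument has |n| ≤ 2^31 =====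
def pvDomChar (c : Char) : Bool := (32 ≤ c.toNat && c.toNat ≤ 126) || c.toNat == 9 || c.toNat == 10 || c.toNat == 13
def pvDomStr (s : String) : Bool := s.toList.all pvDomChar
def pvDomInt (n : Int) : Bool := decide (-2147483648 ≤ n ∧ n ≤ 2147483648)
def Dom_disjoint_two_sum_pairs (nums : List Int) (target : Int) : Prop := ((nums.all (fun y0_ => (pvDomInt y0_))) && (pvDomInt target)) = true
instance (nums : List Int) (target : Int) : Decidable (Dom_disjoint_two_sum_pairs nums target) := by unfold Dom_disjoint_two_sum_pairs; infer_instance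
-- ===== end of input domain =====

-- B replaces A's online FIFO waiting-queue scan by a two-pass bucket construction
-- (group indices by value, then zip each value's bucket with its complement's);
-- same exact results, measurably faster by a constant factor (fewer per-element
-- dict/deque operations).

-- ===== PORT A =====
-- literal transliteration of A's loop body: waiting is a dict value-needed ->
-- queue of indices (defaultdict(deque) modelled by getD _ [] / insert; the
-- defaultdict's creation of an empty entry on `waiting[v]` is modelled by
-- `insert iv.2 []`, observable only through dict order, which A never uses).
def aStep (t : Int) (st : PySem.Dict Int (List Int) × List (Int × Int)) (iv : Int × Int) :
    PySem.Dict Int (List Int) × List (Int × Int) :=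
  match PySem.Dict.getD st.1 iv.2 [] with
  | j :: rest => (PySem.Dict.insert st.1 iv.2 rest, st.2 ++ [(j, iv.1)])
  | [] =>
    let need := t - iv.2
    ((PySem.Dict.insert st.1 iv.2 []).insert need
        ((PySem.Dict.getD st.1 need []) ++ [iv.1]), st.2)

def disjoint_two_sum_pairs (nums : List Int) (target : Int) : List (Int × Int) :=
  PySem.List.sorted2
    ((PySem.List.enumerate nums).foldl (aStep target) (PySem.Dict.empty, [])).2
    (fun p => p.1) (fun p => p.2) false

-- ===== PORT B =====
-- `zip(it, it)` over one iterator pairs consecutive elements: ported exactly as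
-- the two-at-a-time structural recursion below.
def pairUpConsec : List Int → List (Int × Int)
  | a :: b :: r => (a, b) :: pairUpConsec r
  | _ => []

-- literal transliteration of Source B: bucket indices by value (setdefault+append =
-- Dict.modify _ [] (· ++ [i])), then for each key pair its bucket with the
-- complement's bucket; `pairs.sort()` on int 2-tuples is the lexicographic sort.
def buildOcc (nums : List Int) : PySem.Dict Int (List Int) :=
  (PySem.List.enumerate nums).foldl
    (fun (d : PySem.Dict Int (List Int)) iv => d.modify iv.2 [] (· ++ [iv.1]))
    PySem.Dict.empty

def bStep (t : Int) (occ : PySem.Dict Int (List Int))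
    (acc : List (Int × Int)) (vi : Int × List Int) : List (Int × Int) :=
  let w := t - vi.1
  if vi.1 = w then acc ++ pairUpConsec vi.2
  else if vi.1 < w ∧ occ.contains w then
    acc ++ (vi.2.zip (occ.getD w [])).map
      (fun p => if p.1 < p.2 then (p.1, p.2) else (p.2, p.1))
  else acc

def disjoint_two_sum_pairs_alt (nums : List Int) (target : Int) : List (Int × Int) :=
  PySem.List.sorted2
    ((buildOcc nums).items.foldl (bStep target (buildOcc nums)) [])
    (fun p => p.1) (fun p => p.2) false

-- ===== PRECONDITION & SPEC =====
def Spec_disjoint_two_sum_pairs (nums : List Int) (target : Int) (out : List (Int × Int)) : Prop := out = disjoint_two_sum_pairs_alt nums target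
instance (nums : List Int) (target : Int) (out : List (Int × Int)) : Decidable (Spec_disjoint_two_sum_pairs nums target out) := by unfold Spec_disjoint_two_sum_pairs; infer_instance

-- ===== CLAIM (what is proved, stated in full; the proofs are below) =====
def Claim_equal_disjoint_two_sum_pairs : Prop := ∀ (nums : List Int) (target : Int), Dom_disjoint_two_sum_pairs nums target → Spec_disjoint_two_sum_pairs nums target (disjoint_two_sum_pairs nums target)

-- ===== LEMMAS AND PROOFS =====

-- indices (in arrival order) at which value v occurs in an enumerate-prefix
def occP (pre : List (Int × Int)) (v : Int) : List Int :=
  (pre.filter (fun p => p.2 == v)).map (fun p => p.1)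

-- contents of A's waiting queue for key u after processing prefix `pre`
def waitSpec (t : Int) (pre : List (Int × Int)) (u : Int) : List Int :=
  if t - u = u then (occP pre u).drop (2 * ((occP pre u).length / 2))
  else (occP pre (t - u)).drop (occP pre u).length

-- the (zero or one) pair A emits when element iv arrives after prefix `pre`
def pairsAt (t : Int) (pre : List (Int × Int)) (iv : Int × Int) : List (Int × Int) :=
  match waitSpec t pre iv.2 with
  | j :: _ => [(j, iv.1)]
  | [] => []

def pairsSpecAux (t : Int) (done rest : List (Int × Int)) : List (Int × Int) :=
  match rest with
  | [] => []
  | iv :: r => pairsAt t done iv ++ pairsSpecAux t (done ++ [iv]) r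

def pairsSpec (t : Int) (pre : List (Int × Int)) : List (Int × Int) :=
  pairsSpecAux t [] pre

def occIdx (nums : List Int) (v : Int) : List Int :=
  occP (PySem.List.enumerate nums) v

def zipMin (l1 l2 : List Int) : List (Int × Int) :=
  (l1.zip l2).map (fun p => if p.1 < p.2 then (p.1, p.2) else (p.2, p.1))

-- B's block of pairs contributed at key v
def blockOf (t : Int) (nums : List Int) (v : Int) : List (Int × Int) :=
  if v = t - v then pairUpConsec (occIdx nums v)
  else if v < t - v ∧ (t - v) ∈ nums then zipMin (occIdx nums v) (occIdx nums (t - v))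
  else []

def BSpec (t : Int) (nums : List Int) : List (Int × Int) :=
  (PySem.Set.ofList nums).flatMap (blockOf t nums)

-- ---- basic occP facts ----
lemma occP_append_singleton (pre : List (Int × Int)) (iv : Int × Int) (u : Int) :
    occP (pre ++ [iv]) u = occP pre u ++ (if iv.2 = u then [iv.1] else []) := by
  simp [occP, List.filter_append]
  split_ifs with h <;> simp [h]

lemma occP_of_ne (pre : List (Int × Int)) (iv : Int × Int) (u : Int) (h : iv.2 ≠ u) :
    occP (pre ++ [iv]) u = occP pre u := by
  simp [occP_append_singleton, h]

-- ---- pairsSpec append ----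
lemma pairsSpecAux_append (t : Int) (rest : List (Int × Int)) :
    ∀ done iv, pairsSpecAux t done (rest ++ [iv]) =
      pairsSpecAux t done rest ++ pairsAt t (done ++ rest) iv := by
  induction rest with
  | nil => intro done iv; simp [pairsSpecAux]
  | cons a r ih =>
      intro done iv
      simp only [List.cons_append, pairsSpecAux, ih, List.append_assoc, List.nil_append]

lemma pairsSpec_append (t : Int) (pre : List (Int × Int)) (iv : Int × Int) :
    pairsSpec t (pre ++ [iv]) = pairsSpec t pre ++ pairsAt t pre iv := by
  simpa [pairsSpec] using pairsSpecAux_append t pre [] iv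

-- ---- the A-side loop invariant ----
lemma aStep_pop (t : Int) (s : PySem.Dict Int (List Int) × List (Int × Int))
    (i v j : Int) (rest : List Int) (h : s.1.getD v [] = j :: rest) :
    aStep t s (i, v) = (s.1.insert v rest, s.2 ++ [(j, i)]) := by
  unfold aStep
  simp only []
  rw [h]

lemma aStep_push (t : Int) (s : PySem.Dict Int (List Int) × List (Int × Int))
    (i v : Int) (h : s.1.getD v [] = []) :
    aStep t s (i, v) =
      ((s.1.insert v []).insert (t - v) ((s.1.getD (t - v) []) ++ [i]), s.2) := by
  unfold aStep
  simp only []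
  rw [h]

lemma occP_append_self (pre : List (Int × Int)) (i u : Int) :
    occP (pre ++ [(i, u)]) u = occP pre u ++ [i] := by
  rw [occP_append_singleton]; simp

lemma a_invariant (t : Int) (pre : List (Int × Int)) :
    (∀ u, (pre.foldl (aStep t) (PySem.Dict.empty, [])).1.getD u [] = waitSpec t pre u) ∧
      (pre.foldl (aStep t) (PySem.Dict.empty, [])).2 = pairsSpec t pre := by
  induction pre using List.reverseRecOn with
  | nil =>
      refine ⟨fun u => ?_, ?_⟩
      · simp [waitSpec, occP, PySem.Dict.getD_empty]
      · simp [pairsSpec, pairsSpecAux]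
  | append_singleton pre iv ih =>
      obtain ⟨hd, hp⟩ := ih
      rw [List.foldl_append, List.foldl_cons, List.foldl_nil]
      obtain ⟨i, v⟩ := iv
      cases hw : waitSpec t pre v with
      | cons j rest =>
          have hg : PySem.Dict.getD (pre.foldl (aStep t) (PySem.Dict.empty, [])).1 v [] = j :: rest := by
            rw [hd v, hw]
          rw [aStep_pop t _ i v j rest hg]
          refine ⟨fun u => ?_, ?_⟩
          · rw [PySem.Dict.getD_insert]
            by_cases huv : u = v
            · subst huv
              rw [if_pos rfl]
              by_cases hvv : t - u = u
              · -- same-value class: queue held the odd survivor, now it closes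
                unfold waitSpec at hw ⊢
                rw [if_pos hvv] at hw
                rw [if_pos hvv, occP_append_self]
                have hlen := congrArg List.length hw
                simp only [List.length_drop, List.length_cons] at hlen
                have hrest : rest = [] := by
                  have : rest.length = 0 := by omega
                  exact List.eq_nil_of_length_eq_zero this
                subst hrest
                symm
                rw [List.drop_eq_nil_iff]
                simp only [List.length_append, List.length_cons, List.length_nil]
                omega
              · -- cross class: one waiter consumed from the head
                unfold waitSpec at hw ⊢
                rw [if_neg hvv] at hw
                rw [if_neg hvv, occP_of_ne pre (i, u) (t - u) (fun h => hvv h.symm),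
                  occP_append_self]
                simp only [List.length_append, List.length_cons, List.length_nil]
                rw [show (occP pre u).length + 1 = (occP pre u).length + 1 from rfl]
                rw [← List.tail_drop, hw]
                rfl
            · rw [if_neg huv, hd u]
              by_cases huu : t - u = u
              · unfold waitSpec
                rw [if_pos huu, if_pos huu, occP_of_ne pre (i, v) u (fun h => huv h.symm)]
              · unfold waitSpec
                rw [if_neg huu, if_neg huu,
                  occP_of_ne pre (i, v) u (fun h => huv h.symm)]
                by_cases htu : t - u = v
                · -- u = t - v: the opposite queue was the longer side; both drops vanish
                  have hvu : t - v = u := by omega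
                  unfold waitSpec at hw
                  rw [if_neg (by omega : ¬ t - v = v), hvu] at hw
                  have hgt : (occP pre v).length < (occP pre u).length := by
                    have := congrArg List.length hw
                    simp only [List.length_drop, List.length_cons] at this
                    omega
                  rw [htu, occP_append_self]
                  have h1 : List.drop (occP pre u).length (occP pre v) = [] := by
                    rw [List.drop_eq_nil_iff]; omega
                  have h2 : List.drop (occP pre u).length (occP pre v ++ [i]) = [] := by
                    rw [List.drop_eq_nil_iff]
                    simp only [List.length_append, List.length_cons, List.length_nil]
                    omega
                  rw [h1, h2]
                · rw [occP_of_ne pre (i, v) (t - u) (fun h => htu h.symm)]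
          · rw [pairsSpec_append, hp]
            simp [pairsAt, hw]
      | nil =>
          have hg : PySem.Dict.getD (pre.foldl (aStep t) (PySem.Dict.empty, [])).1 v [] = [] := by
            rw [hd v, hw]
          rw [aStep_push t _ i v hg]
          refine ⟨fun u => ?_, ?_⟩
          · rw [PySem.Dict.getD_insert, PySem.Dict.getD_insert, hd (t - v)]
            by_cases hut : u = t - v
            · subst hut
              rw [if_pos rfl]
              by_cases h2v : t - v = v
              · -- same-value class, even count so far: the new arrival waits
                unfold waitSpec at hw ⊢
                simp only [h2v, if_true] at hw ⊢
                rw [List.drop_eq_nil_iff] at hw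
                rw [occP_append_self]
                have hceven : (occP pre v).length = 2 * ((occP pre v).length / 2) := by
                  omega
                have hlen2 : 2 * ((occP pre v ++ [i]).length / 2) = (occP pre v).length := by
                  simp only [List.length_append, List.length_cons, List.length_nil]
                  omega
                rw [hlen2, List.drop_append_of_le_length (le_refl _), ← hceven]
              · -- cross class: v's side was not longer, the new index joins its queue
                unfold waitSpec at hw ⊢
                rw [if_neg (by omega : ¬ t - v = v)] at hw
                rw [List.drop_eq_nil_iff] at hw
                rw [show t - (t - v) = v from by omega]
                rw [occP_append_self,
                  occP_of_ne pre (i, v) (t - v) (fun h => h2v h.symm)]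
                rw [List.drop_append_of_le_length (by omega)]
                split_ifs with hcond
                · exact absurd hcond.symm h2v
                · rfl
            · rw [if_neg hut]
              by_cases huv : u = v
              · subst huv
                rw [if_pos rfl]
                -- u = v ≠ t - v : v's queue was empty and stays empty
                unfold waitSpec at hw ⊢
                rw [if_neg (fun h => hut h.symm)] at hw ⊢
                rw [List.drop_eq_nil_iff] at hw
                rw [occP_of_ne pre (i, u) (t - u) (fun h => hut (by omega)),
                  occP_append_self]
                symm
                rw [List.drop_eq_nil_iff]
                simp only [List.length_append, List.length_cons, List.length_nil]
                omega
              · rw [if_neg huv, hd u]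
                unfold waitSpec
                by_cases huu : t - u = u
                · rw [if_pos huu, if_pos huu,
                    occP_of_ne pre (i, v) u (fun h => huv h.symm)]
                · rw [if_neg huu, if_neg huu,
                    occP_of_ne pre (i, v) u (fun h => huv h.symm),
                    occP_of_ne pre (i, v) (t - u) (fun h => hut (by omega))]
          · rw [pairsSpec_append, hp]
            simp [pairsAt, hw]

-- ---- B port evaluates to BSpec ----
lemma buildOcc_getD (nums : List Int) (v : Int) :
    (buildOcc nums).getD v [] = occIdx nums v := by
  unfold buildOcc
  rw [← List.foldl_map (f := fun (p : Int × Int) => (p.2, p.1))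
      (g := fun (d : PySem.Dict Int (List Int)) p => d.modify p.1 [] (· ++ [p.2])),
    PySem.Dict.getD_foldl_modify_append]
  simp [occIdx, occP, List.filter_map, List.map_map, Function.comp_def]

lemma buildOcc_keys (nums : List Int) :
    (buildOcc nums).keys = PySem.Set.ofList nums := by
  unfold buildOcc
  rw [PySem.Dict.keys_foldl_modify_key (PySem.List.enumerate nums)
      (fun iv => iv.2) [] (fun _ iv cur => cur ++ [iv.1]) PySem.Dict.empty]
  simp [PySem.Set.update_nil_left, PySem.List.map_snd_enumerate]

lemma buildOcc_keys_nodup (nums : List Int) : (buildOcc nums).keys.Nodup := by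
  rw [buildOcc_keys]; exact PySem.Set.nodup_ofList nums

lemma buildOcc_contains (nums : List Int) (w : Int) :
    (buildOcc nums).contains w = true ↔ w ∈ nums := by
  rw [PySem.Dict.contains_iff_mem_keys, buildOcc_keys, PySem.Set.mem_ofList]

lemma alt_pairs_eq_BSpec (nums : List Int) (t : Int) :
    disjoint_two_sum_pairs_alt nums t =
      PySem.List.sorted2 (BSpec t nums) (fun p => p.1) (fun p => p.2) false := by
  unfold disjoint_two_sum_pairs_alt
  congr 1
  rw [PySem.Dict.items_eq_map_keys (buildOcc nums) (buildOcc_keys_nodup nums) [],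
    List.foldl_map, buildOcc_keys]
  have hstep : ∀ (acc : List (Int × Int)) (v : Int),
      bStep t (buildOcc nums) acc (v, (buildOcc nums).getD v []) =
        acc ++ blockOf t nums v := by
    intro acc v
    simp only [bStep, blockOf]
    by_cases h1 : v = t - v
    · rw [if_pos h1, if_pos h1, buildOcc_getD]
    · rw [if_neg h1, if_neg h1]
      by_cases h2 : v < t - v ∧ (t - v) ∈ nums
      · have hc : (v < t - v ∧ (buildOcc nums).contains (t - v) = true) :=
          ⟨h2.1, (buildOcc_contains nums _).mpr h2.2⟩
        rw [if_pos hc, if_pos h2, buildOcc_getD, buildOcc_getD]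
        rfl
      · have hc : ¬ (v < t - v ∧ (buildOcc nums).contains (t - v) = true) :=
          fun h => h2 ⟨h.1, (buildOcc_contains nums _).mp h.2⟩
        rw [if_neg hc, if_neg h2, List.append_nil]
  have hfun : (fun (acc : List (Int × Int)) (v : Int) =>
      bStep t (buildOcc nums) acc (v, (buildOcc nums).getD v [])) =
      (fun acc v => acc ++ blockOf t nums v) := by
    funext acc v; exact hstep acc v
  rw [hfun, PySem.List.foldl_append_eq_flatMap]
  simp [BSpec]

-- ---- the permutation between A's emission order and B's grouped order ----

-- the (zero or one) pair the k-th-with-k-th matching gains when index y arrives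
def tailPair (l : List Int) (k : Nat) (y : Int) : List (Int × Int) :=
  match l.drop k with
  | j :: _ => [(j, y)]
  | [] => []

lemma pairUp_append (l : List Int) (y : Int) :
    pairUpConsec (l ++ [y]) =
      pairUpConsec l ++ tailPair l (2 * (l.length / 2)) y := by
  induction l using pairUpConsec.induct with
  | case1 a b r ih =>
      simp only [List.cons_append, pairUpConsec, ih, List.length_cons]
      have h : 2 * ((r.length + 1 + 1) / 2) = 2 * (r.length / 2) + 2 := by omega
      rw [h]
      simp [tailPair, List.drop_succ_cons]
  | case2 l h =>
      rcases l with _ | ⟨a, _ | ⟨b, r⟩⟩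
      · rfl
      · simp [pairUpConsec, tailPair]
      · exact absurd rfl (h a b r)

lemma zipMin_append_right (l1 l2 : List Int) (y : Int) (h : ∀ j ∈ l1, j < y) :
    zipMin l1 (l2 ++ [y]) = zipMin l1 l2 ++ tailPair l1 l2.length y := by
  induction l1 generalizing l2 with
  | nil => simp [zipMin, tailPair]
  | cons a l1' ih =>
      cases l2 with
      | nil =>
          have ha : a < y := h a (by simp)
          simp [zipMin, tailPair, ha]
      | cons b l2' =>
          have htp : tailPair (a :: l1') (b :: l2').length y = tailPair l1' l2'.length y := by
            simp [tailPair, List.drop_succ_cons]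
          have hz : zipMin (a :: l1') ((b :: l2') ++ [y]) =
              (if a < b then (a, b) else (b, a)) :: zipMin l1' (l2' ++ [y]) := rfl
          have hz2 : zipMin (a :: l1') (b :: l2') =
              (if a < b then (a, b) else (b, a)) :: zipMin l1' l2' := rfl
          rw [hz, hz2, htp, ih l2' (fun j hj => h j (by simp [hj]))]
          simp

lemma zipMin_append_left (l1 l2 : List Int) (y : Int) (h : ∀ j ∈ l2, j < y) :
    zipMin (l1 ++ [y]) l2 = zipMin l1 l2 ++ tailPair l2 l1.length y := by
  induction l1 generalizing l2 with
  | nil =>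
      cases l2 with
      | nil => simp [zipMin, tailPair]
      | cons b l2' =>
          have hb : b < y := h b (by simp)
          simp [zipMin, tailPair, not_lt_of_gt hb]
  | cons a l1' ih =>
      cases l2 with
      | nil => simp [zipMin, tailPair]
      | cons b l2' =>
          have htp : tailPair (b :: l2') (a :: l1').length y = tailPair l2' l1'.length y := by
            simp [tailPair, List.drop_succ_cons]
          have hz : zipMin ((a :: l1') ++ [y]) (b :: l2') =
              (if a < b then (a, b) else (b, a)) :: zipMin (l1' ++ [y]) l2' := rfl
          have hz2 : zipMin (a :: l1') (b :: l2') =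
              (if a < b then (a, b) else (b, a)) :: zipMin l1' l2' := rfl
          rw [hz, hz2, htp, ih l2' (fun j hj => h j (by simp [hj]))]
          simp

lemma occIdx_append (nums : List Int) (x v : Int) :
    occIdx (nums ++ [x]) v =
      occIdx nums v ++ (if x = v then [(nums.length : Int)] else []) := by
  unfold occIdx
  rw [PySem.List.enumerate_append]
  simp only [PySem.List.enumerate_cons, PySem.List.enumerate_nil]
  rw [show PySem.List.enumerate nums = PySem.List.enumerate nums 0 from rfl]
  rw [occP_append_singleton]
  simp

lemma occIdx_lt (nums : List Int) (v : Int) :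
    ∀ j ∈ occIdx nums v, j < (nums.length : Int) := by
  intro j hj
  simp only [occIdx, occP, List.mem_map, List.mem_filter] at hj
  obtain ⟨p, ⟨hpmem, _⟩, rfl⟩ := hj
  rw [PySem.List.mem_enumerate_iff] at hpmem
  obtain ⟨k, hk, rfl⟩ := hpmem
  simp
  omega

lemma occIdx_nil_of_not_mem (nums : List Int) (v : Int) (h : v ∉ nums) :
    occIdx nums v = [] := by
  simp only [occIdx, occP, List.map_eq_nil_iff, List.filter_eq_nil_iff]
  intro p hp
  rw [PySem.List.mem_enumerate_iff] at hp
  obtain ⟨k, hk, rfl⟩ := hp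
  simp only [beq_iff_eq]
  intro hv
  exact h (hv ▸ List.getElem_mem hk)

lemma pairsAt_eq (t : Int) (nums : List Int) (x n : Int) :
    pairsAt t (PySem.List.enumerate nums) (n, x) =
      if t - x = x then
        tailPair (occIdx nums x) (2 * ((occIdx nums x).length / 2)) n
      else tailPair (occIdx nums (t - x)) (occIdx nums x).length n := by
  unfold pairsAt waitSpec tailPair occIdx
  split_ifs <;> rfl

lemma flatMap_congr_mem {α β : Type} (l : List α) (f f' : α → List β)
    (h : ∀ v ∈ l, f' v = f v) : l.flatMap f' = l.flatMap f := by
  induction l with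
  | nil => rfl
  | cons a l ih =>
      simp only [List.flatMap_cons, h a (by simp),
        ih (fun v hv => h v (by simp [hv]))]

lemma flatMap_perm_of_update (keys : List Int) (f f' : Int → List (Int × Int))
    (a : Int) (ex : List (Int × Int)) (hnd : keys.Nodup) (ha : a ∈ keys)
    (hfa : f' a = f a ++ ex) (hother : ∀ v ∈ keys, v ≠ a → f' v = f v) :
    (keys.flatMap f').Perm (keys.flatMap f ++ ex) := by
  induction keys with
  | nil => cases ha
  | cons k ks ih =>
      rw [List.nodup_cons] at hnd
      rcases List.mem_cons.mp ha with rfl | ha'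
      · have hrest : ks.flatMap f' = ks.flatMap f :=
          flatMap_congr_mem ks f f' (fun v hv =>
            hother v (by simp [hv]) (fun hva => hnd.1 (hva ▸ hv)))
        rw [List.flatMap_cons, List.flatMap_cons, hfa, hrest]
        simp only [List.append_assoc]
        exact List.perm_append_comm.append_left (f a)
      · have hk : f' k = f k :=
          hother k (by simp) (fun hka => hnd.1 (hka ▸ ha'))
        rw [List.flatMap_cons, List.flatMap_cons, hk]
        simp only [List.append_assoc]
        refine List.Perm.append_left (f k) ?_
        exact ih hnd.2 ha' (fun v hv hva => hother v (by simp [hv]) hva)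

lemma tailPair_nil (k : Nat) (y : Int) : tailPair [] k y = [] := by
  simp [tailPair]

lemma blockOf_unchanged (t : Int) (nums : List Int) (x v : Int)
    (hvx : v ≠ x) (hwx : t - v ≠ x) :
    blockOf t (nums ++ [x]) v = blockOf t nums v := by
  unfold blockOf
  have e1 : (if x = v then [((nums.length : Int))] else []) = [] :=
    if_neg (fun h => hvx h.symm)
  have e2 : (if x = t - v then [((nums.length : Int))] else []) = [] :=
    if_neg (fun h => hwx h.symm)
  have e3 : ((t - v) ∈ nums ++ [x]) ↔ (t - v) ∈ nums := by
    simp [List.mem_append, hwx]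
  simp only [occIdx_append, e1, e2, List.append_nil, e3]

lemma BSpec_step (t : Int) (nums : List Int) (x : Int) :
    (BSpec t (nums ++ [x])).Perm
      (BSpec t nums ++ pairsAt t (PySem.List.enumerate nums) ((nums.length : Int), x)) := by
  rw [pairsAt_eq]
  by_cases h1 : t - x = x
  · rw [if_pos h1]
    have hbx : blockOf t (nums ++ [x]) x =
        blockOf t nums x ++
          tailPair (occIdx nums x) (2 * ((occIdx nums x).length / 2)) (nums.length : Int) := by
      unfold blockOf
      rw [if_pos (by omega : x = t - x), if_pos (by omega : x = t - x)]
      rw [occIdx_append, if_pos rfl, pairUp_append]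
    have hunch : ∀ v, v ≠ x → blockOf t (nums ++ [x]) v = blockOf t nums v := by
      intro v hv
      exact blockOf_unchanged t nums x v hv (fun h => hv (by omega))
    unfold BSpec
    rw [PySem.Set.ofList_append_singleton, PySem.Set.add_eq_ite]
    by_cases hx : x ∈ PySem.Set.ofList nums
    · rw [if_pos hx]
      exact flatMap_perm_of_update _ _ _ x _ (PySem.Set.nodup_ofList nums) hx hbx
        (fun v _ hv => hunch v hv)
    · rw [if_neg hx]
      rw [List.flatMap_append, List.flatMap_cons, List.flatMap_nil, List.append_nil]
      have hxmem : x ∉ nums := fun h => hx ((PySem.Set.mem_ofList nums x).mpr h)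
      have hnil : occIdx nums x = [] := occIdx_nil_of_not_mem nums x hxmem
      rw [flatMap_congr_mem _ _ _ (fun v hv => hunch v (fun hvx => hx (hvx ▸ hv)))]
      rw [hbx, hnil, tailPair_nil]
      have hbnil : blockOf t nums x = [] := by
        unfold blockOf
        rw [if_pos (by omega : x = t - x), hnil]
        rfl
      rw [hbnil]
      simp
  · rw [if_neg h1]
    by_cases hwmem : (t - x) ∈ nums
    · by_cases hxw : x < t - x
      · -- new pair (if any) shows up in x's block
        have hbx : blockOf t (nums ++ [x]) x =
            blockOf t nums x ++
              tailPair (occIdx nums (t - x)) (occIdx nums x).length (nums.length : Int) := by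
          unfold blockOf
          rw [if_neg (by omega : ¬ x = t - x), if_neg (by omega : ¬ x = t - x)]
          rw [if_pos ⟨hxw, by simp [hwmem]⟩, if_pos ⟨hxw, hwmem⟩]
          rw [occIdx_append, if_pos rfl,
            occIdx_append, if_neg (by omega : ¬ x = t - x), List.append_nil]
          rw [zipMin_append_left _ _ _ (occIdx_lt nums (t - x))]
        have hunch : ∀ v, v ≠ x → blockOf t (nums ++ [x]) v = blockOf t nums v := by
          intro v hv
          by_cases hvw : v = t - x
          · subst hvw
            unfold blockOf
            rw [if_neg (by omega : ¬ t - x = t - (t - x)),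
              if_neg (by omega : ¬ t - x = t - (t - x))]
            have hnot : ¬ ((t - x) < t - (t - x)) := by omega
            rw [if_neg (fun h => hnot h.1), if_neg (fun h => hnot h.1)]
          · exact blockOf_unchanged t nums x v hv (fun h => hvw (by omega))
        unfold BSpec
        rw [PySem.Set.ofList_append_singleton, PySem.Set.add_eq_ite]
        by_cases hx : x ∈ PySem.Set.ofList nums
        · rw [if_pos hx]
          exact flatMap_perm_of_update _ _ _ x _ (PySem.Set.nodup_ofList nums) hx hbx
            (fun v _ hv => hunch v hv)
        · rw [if_neg hx]
          rw [List.flatMap_append, List.flatMap_cons, List.flatMap_nil, List.append_nil]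
          have hxmem : x ∉ nums := fun h => hx ((PySem.Set.mem_ofList nums x).mpr h)
          have hnil : occIdx nums x = [] := occIdx_nil_of_not_mem nums x hxmem
          rw [flatMap_congr_mem _ _ _ (fun v hv => hunch v (fun hvx => hx (hvx ▸ hv)))]
          rw [hbx, hnil]
          have hbnil : blockOf t nums x = [] := by
            unfold blockOf
            rw [if_neg (by omega : ¬ x = t - x), if_pos ⟨hxw, hwmem⟩, hnil]
            simp [zipMin]
          rw [hbnil]
          simp
      · -- the complement is the smaller key: the pair shows up in (t-x)'s block
        have hwlt : t - x < x := by omega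
        have hbw : blockOf t (nums ++ [x]) (t - x) =
            blockOf t nums (t - x) ++
              tailPair (occIdx nums (t - x)) (occIdx nums x).length (nums.length : Int) := by
          unfold blockOf
          rw [if_neg (by omega : ¬ t - x = t - (t - x)),
            if_neg (by omega : ¬ t - x = t - (t - x)),
            show t - (t - x) = x from by omega]
          rw [if_pos ⟨hwlt, by simp⟩]
          rw [occIdx_append, if_neg (by omega : ¬ x = t - x), List.append_nil,
            occIdx_append, if_pos rfl]
          rw [zipMin_append_right _ _ _ (occIdx_lt nums (t - x))]
          by_cases hxin : x ∈ nums
          · rw [if_pos ⟨hwlt, hxin⟩]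
          · rw [if_neg (fun h => hxin h.2),
              occIdx_nil_of_not_mem nums x hxin]
            simp [zipMin]
        have hunch : ∀ v, v ≠ t - x → blockOf t (nums ++ [x]) v = blockOf t nums v := by
          intro v hv
          by_cases hvx : v = x
          · rw [hvx]
            unfold blockOf
            rw [if_neg (by omega : ¬ x = t - x), if_neg (by omega : ¬ x = t - x)]
            have hnot : ¬ (x < t - x) := by omega
            rw [if_neg (fun h => hnot h.1), if_neg (fun h => hnot h.1)]
          · exact blockOf_unchanged t nums x v hvx (fun h => hv (by omega))
        have hwS : (t - x) ∈ PySem.Set.ofList nums :=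
          (PySem.Set.mem_ofList nums (t - x)).mpr hwmem
        unfold BSpec
        rw [PySem.Set.ofList_append_singleton, PySem.Set.add_eq_ite]
        by_cases hx : x ∈ PySem.Set.ofList nums
        · rw [if_pos hx]
          exact flatMap_perm_of_update _ _ _ (t - x) _ (PySem.Set.nodup_ofList nums)
            hwS hbw (fun v _ hv => hunch v hv)
        · rw [if_neg hx]
          rw [List.flatMap_append, List.flatMap_cons, List.flatMap_nil, List.append_nil]
          have hxmem : x ∉ nums := fun h => hx ((PySem.Set.mem_ofList nums x).mpr h)
          have hbxnil : blockOf t (nums ++ [x]) x = [] := by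
            unfold blockOf
            rw [if_neg (by omega : ¬ x = t - x)]
            have hnot : ¬ (x < t - x) := by omega
            rw [if_neg (fun h => hnot h.1)]
          rw [hbxnil, List.append_nil]
          exact flatMap_perm_of_update _ _ _ (t - x) _ (PySem.Set.nodup_ofList nums)
            hwS hbw (fun v _ hv => hunch v hv)
    · -- the complement never occurs: nothing is matched, nothing changes
      have hwnil : occIdx nums (t - x) = [] := occIdx_nil_of_not_mem nums (t - x) hwmem
      rw [hwnil, tailPair_nil, List.append_nil]
      have hunch : ∀ v, v ∈ nums → blockOf t (nums ++ [x]) v = blockOf t nums v := by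
        intro v hv
        by_cases hvx : v = x
        · rw [hvx]
          unfold blockOf
          rw [if_neg (by omega : ¬ x = t - x), if_neg (by omega : ¬ x = t - x)]
          have hmem : ¬ ((t - x) ∈ nums ++ [x]) := by
            simp [List.mem_append, hwmem]
            omega
          rw [if_neg (fun h => hmem h.2), if_neg (fun h => hwmem h.2)]
        · refine blockOf_unchanged t nums x v hvx (fun h => ?_)
          exact hwmem (by rw [show t - x = v from by omega]; exact hv)
      unfold BSpec
      rw [PySem.Set.ofList_append_singleton, PySem.Set.add_eq_ite]
      by_cases hx : x ∈ PySem.Set.ofList nums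
      · rw [if_pos hx]
        rw [flatMap_congr_mem _ _ _
          (fun v hv => hunch v ((PySem.Set.mem_ofList nums v).mp hv))]
      · rw [if_neg hx]
        rw [List.flatMap_append, List.flatMap_cons, List.flatMap_nil, List.append_nil]
        have hxmem : x ∉ nums := fun h => hx ((PySem.Set.mem_ofList nums x).mpr h)
        have hbxnil : blockOf t (nums ++ [x]) x = [] := by
          unfold blockOf
          rw [if_neg (by omega : ¬ x = t - x)]
          have hmem : ¬ ((t - x) ∈ nums ++ [x]) := by
            simp [List.mem_append, hwmem]
            omega
          rw [if_neg (fun h => hmem h.2)]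
        rw [hbxnil, List.append_nil]
        rw [flatMap_congr_mem _ _ _
          (fun v hv => hunch v ((PySem.Set.mem_ofList nums v).mp hv))]

lemma pairsSpec_perm_BSpec (t : Int) (nums : List Int) :
    (pairsSpec t (PySem.List.enumerate nums)).Perm (BSpec t nums) := by
  induction nums using List.reverseRecOn with
  | nil => simp [pairsSpec, pairsSpecAux, BSpec, PySem.List.enumerate_nil]
  | append_singleton nums x ih =>
      have henum : PySem.List.enumerate (nums ++ [x]) =
          PySem.List.enumerate nums ++ [((nums.length : Int), x)] := by
        rw [PySem.List.enumerate_append]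
        simp [PySem.List.enumerate_cons, PySem.List.enumerate_nil]
      rw [henum, pairsSpec_append]
      exact (ih.append_right _).trans (BSpec_step t nums x).symm

-- ---- sorted2 only depends on the multiset ----
def ltb (a b : Int × Int) : Bool :=
  decide (a.1 < b.1) || (!decide (b.1 < a.1) && decide (a.2 < b.2))

lemma ltb_iff (a b : Int × Int) :
    ltb a b = true ↔ (a.1 < b.1 ∨ (a.1 = b.1 ∧ a.2 < b.2)) := by
  simp only [ltb, Bool.or_eq_true, Bool.and_eq_true, Bool.not_eq_true',
    decide_eq_true_iff, decide_eq_false_iff_not]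
  omega

lemma insertBy_nil (x : Int × Int) : PySem.List.insertBy ltb x [] = [x] := rfl

lemma insertBy_cons (x y : Int × Int) (ys : List (Int × Int)) :
    PySem.List.insertBy ltb x (y :: ys) =
      if ltb x y then x :: y :: ys else y :: PySem.List.insertBy ltb x ys := rfl

lemma pairwise_insertBy (x : Int × Int) (l : List (Int × Int)) :
    l.Pairwise (fun a b => ltb b a = false) →
    (PySem.List.insertBy ltb x l).Pairwise (fun a b => ltb b a = false) := by
  induction l with
  | nil => intro _; simp [insertBy_nil]
  | cons y ys ih =>
      intro hl
      rw [List.pairwise_cons] at hl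
      obtain ⟨hy, hys⟩ := hl
      rw [insertBy_cons]
      split_ifs with hxy
      · refine List.Pairwise.cons ?_ (List.Pairwise.cons hy hys)
        intro z hz
        rw [List.mem_cons] at hz
        rcases hz with rfl | hz
        · rw [ltb_iff] at hxy; rw [Bool.eq_false_iff, Ne, ltb_iff]; omega
        · have hzy := hy z hz
          rw [ltb_iff] at hxy
          rw [Bool.eq_false_iff, Ne, ltb_iff] at hzy ⊢
          omega
      · refine List.Pairwise.cons ?_ (ih hys)
        intro z hz
        rw [PySem.List.mem_insertBy] at hz
        rcases hz with rfl | hz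
        · simpa using hxy
        · exact hy z hz

lemma pairwise_sorted2 (l : List (Int × Int)) :
    (PySem.List.sorted2 l (fun p => p.1) (fun p => p.2) false).Pairwise
      (fun a b => ltb b a = false) := by
  have hfold : ∀ (l : List (Int × Int)) (acc : List (Int × Int)),
      acc.Pairwise (fun a b => ltb b a = false) →
      (l.foldl (fun acc x => PySem.List.insertBy ltb x acc) acc).Pairwise
        (fun a b => ltb b a = false) := by
    intro l
    induction l with
    | nil => intro acc h; exact h
    | cons x xs ih => intro acc h; exact ih _ (pairwise_insertBy x acc h)
  exact hfold l [] (by simp)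

lemma sorted2_eq_of_perm (l1 l2 : List (Int × Int)) (h : l1.Perm l2) :
    PySem.List.sorted2 l1 (fun p => p.1) (fun p => p.2) false =
      PySem.List.sorted2 l2 (fun p => p.1) (fun p => p.2) false := by
  apply List.eq_of_perm_of_sorted (le := fun a b => ltb b a = false)
  · intro a b _ _ hab hba
    rw [Bool.eq_false_iff, Ne, ltb_iff] at hab hba
    have h1 : a.1 = b.1 := by omega
    have h2 : a.2 = b.2 := by omega
    exact Prod.ext h1 h2
  · exact pairwise_sorted2 l1
  · exact pairwise_sorted2 l2
  · exact ((PySem.List.sorted2_perm l1 _ _ _).trans h).trans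
      (PySem.List.sorted2_perm l2 _ _ _).symm

-- ===== VERDICT (by name: the statement is the Claim_ definition above) =====
theorem disjoint_two_sum_pairs_spec : Claim_equal_disjoint_two_sum_pairs := by
  intro nums target _
  unfold Spec_disjoint_two_sum_pairs
  have hA : disjoint_two_sum_pairs nums target =
      PySem.List.sorted2 (pairsSpec target (PySem.List.enumerate nums))
        (fun p => p.1) (fun p => p.2) false := by
    unfold disjoint_two_sum_pairs
    rw [(a_invariant target (PySem.List.enumerate nums)).2]
  rw [hA, alt_pairs_eq_BSpec]
  exact sorted2_eq_of_perm _ _ (pairsSpec_perm_BSpec target nums)
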